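-- pv_equiv track=rewrite | github.com/NathanKe/AdventPython | 2023/14_answer.py | shuffle_right
-- ===== SOURCE A (Python) =====
-- from collections import deque
--
-- def shuffle_right(i_str):
--     queue = deque(i_str)
--     out = deque()
--     dots = []
--     ohs = []
--     while queue:
--         cur = queue.pop()
--         if cur == '#':
--             [out.appendleft(o) for o in ohs]
--             [out.appendleft(d) for d in dots]
--             ohs = []
--             dots = []
--             out.appendleft(cur)
--         elif cur == 'O':
--             ohs.append(cur)
--         else:
--             dots.append(cur)
--     [out.appendleft(o) for o in ohs]
--     [out.appendleft(d) for d in dots]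
--     res = ''.join(out)
--     assert len(i_str) == len(res)
--     return res
-- ===== SOURCE B (Python) =====
-- def shuffle_right(i_str):
--     return '#'.join(seg.replace('O', '') + 'O' * seg.count('O')
--                     for seg in i_str.split('#'))
-- ===== Notes on version B (the rewrite author's own statement) =====
-- stated objective: simpler
-- what changed: Replaces the deque pop/appendleft loop with three accumulators by splitting on '#' and rebuilding each segment as its non-'O' characters followed by its 'O's via str.split/replace/count/join; the always-true length assertion is dropped.
import Mathlib
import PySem

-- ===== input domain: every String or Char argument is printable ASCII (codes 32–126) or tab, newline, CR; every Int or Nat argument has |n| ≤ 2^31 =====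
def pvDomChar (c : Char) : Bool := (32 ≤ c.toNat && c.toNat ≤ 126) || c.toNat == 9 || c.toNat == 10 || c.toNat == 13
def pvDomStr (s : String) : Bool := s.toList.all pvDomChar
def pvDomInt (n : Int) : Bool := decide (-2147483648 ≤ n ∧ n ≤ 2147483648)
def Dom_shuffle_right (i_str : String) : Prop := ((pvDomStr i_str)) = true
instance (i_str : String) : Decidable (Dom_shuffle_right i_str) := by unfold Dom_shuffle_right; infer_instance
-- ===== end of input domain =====

-- B rebuilds each '#'-delimited segment as its non-'O' characters followed by its 'O's
-- (split/replace/count/join) instead of A's deque pop/appendleft loop with three accumulators;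
-- same O(n) cost, simpler decomposition. A's always-true length assertion is dropped.

-- ===== PORT A =====
-- 'queue.pop()' takes the rightmost element, so the while-loop reads the reversed string
-- left to right; 'out.appendleft' is cons onto the out list; the '[… for o in ohs]'
-- comprehensions appendleft each element in order, i.e. prepend the reversed list.
def shARun : List Char → List Char → List Char → List Char → List Char
  | [], out, dots, ohs => dots.reverse ++ (ohs.reverse ++ out)
  | c :: q, out, dots, ohs =>
    if c = '#' then shARun q ('#' :: (dots.reverse ++ (ohs.reverse ++ out))) [] []
    else if c = 'O' then shARun q out dots (ohs ++ [c])
    else shARun q out (dots ++ [c]) ohs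

-- the final 'assert len(i_str) == len(res)' always holds and is dropped
def shuffle_right (i_str : String) : String :=
  String.mk (shARun i_str.toList.reverse [] [] [])

-- ===== PORT B =====
-- seg.replace('O','') + 'O'*seg.count('O')
def shFixSeg (seg : List Char) : List Char :=
  PySem.Chars.replace seg ['O'] [] ++ PySem.List.pyRepeat ['O'] ((PySem.Chars.count seg ['O'] : Int))

-- '#'.join(… for seg in i_str.split('#'))
def shuffle_right_alt (i_str : String) : String :=
  String.mk (PySem.Chars.join ['#'] ((PySem.Chars.splitOn i_str.toList ['#']).map shFixSeg))

-- ===== PRECONDITION & SPEC =====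
def Spec_shuffle_right (i_str : String) (out : String) : Prop := out = shuffle_right_alt i_str
instance (i_str : String) (out : String) : Decidable (Spec_shuffle_right i_str out) := by unfold Spec_shuffle_right; infer_instance

-- ===== CLAIM (what is proved, stated in full; the proofs are below) =====
def Claim_equal_shuffle_right : Prop := ∀ (i_str : String), Dom_shuffle_right i_str → Spec_shuffle_right i_str (shuffle_right i_str)

-- ===== LEMMAS AND PROOFS =====

-- proof-side: A's loop with the 'out' accumulator peeled off
def shAF : List Char → List Char → List Char → List Char
  | [], dots, ohs => dots.reverse ++ ohs.reverse
  | c :: q, dots, ohs =>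
    if c = '#' then shAF q [] [] ++ ('#' :: (dots.reverse ++ ohs.reverse))
    else if c = 'O' then shAF q dots (ohs ++ [c])
    else shAF q (dots ++ [c]) ohs

-- proof-side: structural split on '#'
def pvSplit : List Char → List (List Char)
  | [] => [[]]
  | c :: rest =>
    if c = '#' then [] :: pvSplit rest
    else
      match pvSplit rest with
      | [] => [[c]]
      | s :: ss => (c :: s) :: ss

-- proof-side: canonical segment rebuild
def pvFix (seg : List Char) : List Char :=
  seg.filter (fun c => !(c == 'O')) ++ List.replicate (seg.count 'O') 'O'

lemma shARun_eq_shAF (q : List Char) : ∀ out dots ohs,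
    shARun q out dots ohs = shAF q dots ohs ++ out := by
  induction q with
  | nil => intro out dots ohs; simp [shARun, shAF]
  | cons c q ih =>
    intro out dots ohs
    by_cases h1 : c = '#'
    · simp [shARun, shAF, h1, ih]
    · by_cases h2 : c = 'O' <;> simp [shARun, shAF, h1, h2, ih]

lemma shAF_no_hash (q : List Char) : ∀ dots ohs, '#' ∉ q →
    shAF q dots ohs =
      (dots ++ q.filter (fun c => !(c == 'O'))).reverse ++
      (ohs ++ q.filter (fun c => c == 'O')).reverse := by
  induction q with
  | nil => intro dots ohs _; simp [shAF]
  | cons c q ih =>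
    intro dots ohs h
    have h1 : c ≠ '#' := fun hc => h (hc ▸ List.mem_cons_self ..)
    have h' : '#' ∉ q := fun hm => h (List.mem_cons_of_mem _ hm)
    by_cases h2 : c = 'O'
    · simp [shAF, h1, h2, ih _ _ h']
    · simp [shAF, h1, h2, ih _ _ h']

lemma shAF_split (s : List Char) : ∀ t dots ohs, '#' ∉ s →
    shAF (s ++ '#' :: t) dots ohs = shAF t [] [] ++ '#' :: shAF s dots ohs := by
  induction s with
  | nil => intro t dots ohs _; simp [shAF]
  | cons c s ih =>
    intro t dots ohs h
    have h1 : c ≠ '#' := fun hc => h (hc ▸ List.mem_cons_self ..)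
    have h' : '#' ∉ s := fun hm => h (List.mem_cons_of_mem _ hm)
    by_cases h2 : c = 'O' <;> simp [shAF, h1, h2, ih _ _ _ h']

lemma pvSplit_ne_nil (l : List Char) : pvSplit l ≠ [] := by
  cases l with
  | nil => simp [pvSplit]
  | cons c rest =>
    by_cases h : c = '#'
    · simp [pvSplit, h]
    · simp only [pvSplit, h, if_false]
      rcases hr : pvSplit rest with _ | ⟨s, ss⟩ <;> simp

lemma pvSplit_no_hash (l : List Char) (h : '#' ∉ l) : pvSplit l = [l] := by
  induction l with
  | nil => simp [pvSplit]
  | cons c rest ih =>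
    have h1 : c ≠ '#' := fun hc => h (hc ▸ List.mem_cons_self ..)
    have h' : '#' ∉ rest := fun hm => h (List.mem_cons_of_mem _ hm)
    simp [pvSplit, h1, ih h']

lemma pvSplit_append_hash (pre : List Char) : ∀ s, '#' ∉ s →
    pvSplit (pre ++ '#' :: s) = pvSplit pre ++ [s] := by
  induction pre with
  | nil => intro s hs; simp [pvSplit, pvSplit_no_hash s hs]
  | cons c pre ih =>
    intro s hs
    by_cases h1 : c = '#'
    · simp [pvSplit, h1, ih s hs]
    · simp only [List.cons_append, pvSplit, h1, if_false, ih s hs]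
      rcases hp : pvSplit pre with _ | ⟨x, xs⟩
      · exact absurd hp (pvSplit_ne_nil pre)
      · simp [hp]

lemma join_map_append_last (xs : List (List Char)) (s : List Char) (f : List Char → List Char)
    (hxs : xs ≠ []) :
    PySem.Chars.join ['#'] ((xs ++ [s]).map f) =
      PySem.Chars.join ['#'] (xs.map f) ++ '#' :: f s := by
  induction xs with
  | nil => exact absurd rfl hxs
  | cons x xs ih =>
    cases xs with
    | nil => simp [PySem.Chars.join_cons_cons, PySem.Chars.join_singleton]
    | cons y ys =>
      have := ih (by simp)
      simp only [List.cons_append, List.map_cons] at this ⊢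
      rw [PySem.Chars.join_cons_cons, PySem.Chars.join_cons_cons, this]
      simp

-- splitOn.go with singleton separator computes pvSplit
def pvPrep (x : List Char) : List (List Char) → List (List Char)
  | [] => [x]
  | s :: ss => (x ++ s) :: ss

lemma splitOn_go_eq (l : List Char) : ∀ fuel cur acc, l.length ≤ fuel →
    PySem.Chars.splitOn.go ['#'] fuel l cur acc =
      acc.reverse ++ pvPrep cur.reverse (pvSplit l) := by
  induction l with
  | nil =>
    intro fuel cur acc _
    cases fuel <;> simp [PySem.Chars.splitOn.go, pvSplit, pvPrep]
  | cons c rest ih =>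
    intro fuel cur acc hf
    cases fuel with
    | zero => simp at hf
    | succ f =>
      have hf' : rest.length ≤ f := by simpa using hf
      by_cases h1 : c = '#'
      · subst h1
        simp only [PySem.Chars.splitOn.go, List.isPrefixOf, BEq.rfl, Bool.true_and, if_true, List.length_cons, List.length_nil,
          Nat.zero_add, List.drop_succ_cons, List.drop_zero]
        rw [ih f [] (cur.reverse :: acc) hf']
        rcases hr : pvSplit rest with _ | ⟨s, ss⟩
        · exact absurd hr (pvSplit_ne_nil rest)
        · simp [pvSplit, pvPrep, hr]
      · have hpre : (['#'].isPrefixOf (c :: rest)) = false := by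
          simp [List.isPrefixOf]
          exact fun hc => absurd hc.symm h1
        simp only [PySem.Chars.splitOn.go, hpre, if_neg Bool.false_ne_true]
        rw [ih f (c :: cur) acc hf']
        rcases hr : pvSplit rest with _ | ⟨s, ss⟩
        · exact absurd hr (pvSplit_ne_nil rest)
        · simp [pvSplit, h1, pvPrep, hr]

lemma splitOn_eq_pvSplit (l : List Char) : PySem.Chars.splitOn l ['#'] = pvSplit l := by
  rw [PySem.Chars.splitOn, splitOn_go_eq l (l.length + 1) [] [] (by omega)]
  rcases hr : pvSplit l with _ | ⟨s, ss⟩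
  · exact absurd hr (pvSplit_ne_nil l)
  · simp [pvPrep]

lemma replace_go_eq (l : List Char) : ∀ fuel acc, l.length ≤ fuel →
    PySem.Chars.replace.go ['O'] [] fuel l acc =
      acc.reverse ++ l.filter (fun c => !(c == 'O')) := by
  induction l with
  | nil =>
    intro fuel acc _
    cases fuel <;> simp [PySem.Chars.replace.go]
  | cons c rest ih =>
    intro fuel acc hf
    cases fuel with
    | zero => simp at hf
    | succ f =>
      have hf' : rest.length ≤ f := by simpa using hf
      by_cases h1 : c = 'O'
      · subst h1
        simp only [PySem.Chars.replace.go, List.isPrefixOf, BEq.rfl, Bool.true_and, if_true, List.length_cons, List.length_nil,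
          Nat.zero_add, List.drop_succ_cons, List.drop_zero,
          List.reverse_nil, List.nil_append]
        rw [ih f acc hf']
        simp
      · have hpre : (['O'].isPrefixOf (c :: rest)) = false := by
          simp [List.isPrefixOf]
          exact fun hc => absurd hc.symm h1
        simp only [PySem.Chars.replace.go, hpre, if_neg Bool.false_ne_true]
        rw [ih f (c :: acc) hf']
        simp [h1]

lemma replace_eq_filter (l : List Char) :
    PySem.Chars.replace l ['O'] [] = l.filter (fun c => !(c == 'O')) := by
  rw [PySem.Chars.replace]
  simp only [List.isEmpty_cons, if_neg Bool.false_ne_true]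
  simpa using replace_go_eq l l.length [] le_rfl

lemma count_go_eq (l : List Char) : ∀ fuel acc, l.length ≤ fuel →
    PySem.Chars.count.go ['O'] fuel l acc = acc + l.count 'O' := by
  induction l with
  | nil =>
    intro fuel acc _
    cases fuel <;> simp [PySem.Chars.count.go]
  | cons c rest ih =>
    intro fuel acc hf
    cases fuel with
    | zero => simp at hf
    | succ f =>
      have hf' : rest.length ≤ f := by simpa using hf
      by_cases h1 : c = 'O'
      · subst h1
        simp only [PySem.Chars.count.go, List.isPrefixOf, BEq.rfl, Bool.true_and, if_true, List.length_cons, List.length_nil,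
          Nat.zero_add, List.drop_succ_cons, List.drop_zero]
        rw [ih f (acc + 1) hf']
        simp
        omega
      · have hpre : (['O'].isPrefixOf (c :: rest)) = false := by
          simp [List.isPrefixOf]
          exact fun hc => absurd hc.symm h1
        simp only [PySem.Chars.count.go, hpre, if_neg Bool.false_ne_true]
        rw [ih f acc hf']
        simp [h1]

lemma count_eq_count (l : List Char) : PySem.Chars.count l ['O'] = l.count 'O' := by
  rw [PySem.Chars.count]
  simp only [List.isEmpty_cons, if_neg Bool.false_ne_true]
  simpa using count_go_eq l l.length 0 le_rfl

lemma shFixSeg_eq_pvFix (seg : List Char) : shFixSeg seg = pvFix seg := by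
  rw [shFixSeg, pvFix, replace_eq_filter, count_eq_count, PySem.List.pyRepeat_singleton]
  simp

-- base case: a '#'-free string is one segment
lemma shAF_reverse_no_hash (l : List Char) (h : '#' ∉ l) :
    shAF l.reverse [] [] = pvFix l := by
  have hr : '#' ∉ l.reverse := by simpa using h
  rw [shAF_no_hash l.reverse [] [] hr, pvFix]
  simp [List.filter_reverse, List.filter_beq]

-- main characterisation of A's loop
lemma shAF_reverse_eq (n : Nat) : ∀ l : List Char, l.length ≤ n →
    shAF l.reverse [] [] = PySem.Chars.join ['#'] ((pvSplit l).map pvFix) := by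
  induction n with
  | zero =>
    intro l hl
    have : l = [] := List.eq_nil_of_length_eq_zero (by omega)
    subst this
    simp [shAF, pvSplit, PySem.Chars.join_singleton, pvFix]
  | succ n ih =>
    intro l hl
    by_cases hmem : '#' ∈ l
    · -- split l at its LAST '#': l = pre ++ '#' :: s with '#' ∉ s
      set t := l.reverse.takeWhile (fun c => !(c == '#')) with ht
      set d := l.reverse.dropWhile (fun c => !(c == '#')) with hd
      have htd : t ++ d = l.reverse := List.takeWhile_append_dropWhile
      have hdne : d ≠ [] := by
        intro hnil
        have : l.reverse = t := by rw [← htd, hnil, List.append_nil]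
        have hmr : '#' ∈ l.reverse := by simpa using hmem
        rw [this] at hmr
        have := List.mem_takeWhile_imp hmr
        simp at this
      rcases hdexists : d with _ | ⟨c, rest⟩
      · exact absurd hdexists hdne
      have hdw : l.reverse.dropWhile (fun c => !(c == '#')) = c :: rest := by
        rw [← hd, hdexists]
      have hdne' : l.reverse.dropWhile (fun c => !(c == '#')) ≠ [] := by
        rw [hdw]; simp
      have hc : c = '#' := by
        have h1 := List.head_dropWhile_not (p := fun c => !(c == '#')) (l := l.reverse) hdne'
        have h2 : (l.reverse.dropWhile (fun c => !(c == '#'))).head? = some c := by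
          rw [hdw]; rfl
        rw [List.head?_eq_some_head hdne'] at h2
        have h3 := Option.some.inj h2
        rw [h3] at h1
        simpa using h1
      have htnh : '#' ∉ t := by
        intro hm
        have := List.mem_takeWhile_imp hm
        simp at this
      -- l = rest.reverse ++ '#' :: t.reverse
      have hl2 : l = rest.reverse ++ '#' :: t.reverse := by
        have : l.reverse = t ++ '#' :: rest := by rw [← htd, hdexists, hc]
        calc l = l.reverse.reverse := (List.reverse_reverse l).symm
        _ = (t ++ '#' :: rest).reverse := by rw [this]
        _ = rest.reverse ++ '#' :: t.reverse := by simp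
      have hsnh : '#' ∉ t.reverse := by simpa using htnh
      have hlen : rest.reverse.length ≤ n := by
        have h5 : l.length = (rest.reverse ++ '#' :: t.reverse).length := by rw [← hl2]
        simp at h5 ⊢
        omega
      have hrevrev : l.reverse = t ++ '#' :: rest.reverse.reverse := by
        rw [List.reverse_reverse, ← htd, hdexists, hc]
      rw [hrevrev, shAF_split t rest.reverse.reverse [] [] htnh,
        ih rest.reverse hlen]
      have hts : shAF t [] [] = pvFix t.reverse := by
        have := shAF_reverse_no_hash t.reverse hsnh
        simpa using this
      rw [hts, hl2, pvSplit_append_hash rest.reverse t.reverse hsnh,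
        join_map_append_last _ _ _ (pvSplit_ne_nil rest.reverse)]
    · rw [pvSplit_no_hash l hmem]
      simp only [List.map_cons, List.map_nil, PySem.Chars.join_singleton]
      exact shAF_reverse_no_hash l hmem

-- ===== VERDICT (by name: the statement is the Claim_ definition above) =====
theorem shuffle_right_spec : Claim_equal_shuffle_right := by
  intro i_str _
  unfold Spec_shuffle_right
  rw [shuffle_right, shuffle_right_alt, shARun_eq_shAF, List.append_nil,
    shAF_reverse_eq i_str.toList.length i_str.toList le_rfl,
    splitOn_eq_pvSplit]
  have hmap : List.map shFixSeg (pvSplit i_str.toList) = List.map pvFix (pvSplit i_str.toList) :=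
    List.map_congr_left fun seg _ => shFixSeg_eq_pvFix seg
  rw [hmap]
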